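-- pv_equiv track=rewrite | github.com/ebookleader/BOJ | bfs/14562.py | bfs
-- ===== SOURCE A (Python) =====
-- from collections import deque
--
-- def bfs(s, t, cnt):
--     queue = deque()
--     queue.append([s, t, cnt]) # 태균, 상대
--     while queue:
--         me, opponent, cnt = queue.popleft()
--         if me == opponent:
--             return cnt
--         if me < opponent:
--             x, y = me*2, opponent+3
--             if x <= y:
--                 queue.append([x, y, cnt + 1])
--             x, y = me+1, opponent
--             if x <= y:
--                 queue.append([x, y, cnt + 1])
-- ===== SOURCE B (Python) =====
-- def bfs(s, t, cnt):
--     # Level-synchronous BFS over deduplicated (me, opponent) state sets: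
--     # cnt counts the current level; no per-node queue entries, no duplicates.
--     frontier = {(s, t)}
--     while frontier:
--         if any(me == op for me, op in frontier):
--             return cnt
--         nxt = set()
--         for me, op in frontier:
--             if me < op:
--                 if me * 2 <= op + 3:
--                     nxt.add((me * 2, op + 3))
--                 nxt.add((me + 1, op))
--         frontier = nxt
--         cnt += 1
--     return None
-- ===== Notes on version B (the rewrite author's own statement) =====
-- stated objective: alternative
-- what changed: Replaced the per-node FIFO BFS carrying a count in every queue entry with a level-synchronous BFS over deduplicated frontier sets and a single level counter.
import Mathlib
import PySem

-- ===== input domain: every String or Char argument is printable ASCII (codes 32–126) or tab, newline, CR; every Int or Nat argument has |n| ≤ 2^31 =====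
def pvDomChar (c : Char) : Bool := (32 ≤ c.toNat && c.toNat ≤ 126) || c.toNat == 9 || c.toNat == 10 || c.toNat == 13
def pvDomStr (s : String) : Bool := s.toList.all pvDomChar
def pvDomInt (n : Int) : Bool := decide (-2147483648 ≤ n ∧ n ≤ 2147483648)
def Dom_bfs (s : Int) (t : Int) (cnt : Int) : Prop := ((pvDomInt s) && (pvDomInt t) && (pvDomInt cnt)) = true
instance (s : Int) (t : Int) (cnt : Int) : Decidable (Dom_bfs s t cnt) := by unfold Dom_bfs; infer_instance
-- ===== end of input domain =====

-- B replaces A's per-node FIFO BFS (each queue entry carries its own count) by a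
-- level-synchronous BFS over deduplicated frontier sets with a single level counter.

-- ---- termination helpers for the two loops (cited by the ports' decreasing_by) ----

/-- min over the valid entries (me ≤ opp) of (gap+1); 0 when no entry is valid. -/
def pvNu3 : List (Int × Int × Int) → Nat
  | [] => 0
  | p :: q =>
    if p.1 ≤ p.2.1 then
      (if pvNu3 q = 0 then (p.2.1 - p.1).toNat + 1 else min ((p.2.1 - p.1).toNat + 1) (pvNu3 q))
    else pvNu3 q

/-- index of the first valid entry attaining the min gap (length if none). -/
def pvIdx3 (q : List (Int × Int × Int)) : Nat :=
  q.findIdx (fun p => decide (p.1 ≤ p.2.1) && ((p.2.1 - p.1).toNat + 1 == pvNu3 q))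

theorem pvNu3_le_of_mem {q : List (Int × Int × Int)} {p : Int × Int × Int}
    (hp : p ∈ q) (hv : p.1 ≤ p.2.1) : 0 < pvNu3 q ∧ pvNu3 q ≤ (p.2.1 - p.1).toNat + 1 := by
  induction q with
  | nil => cases hp
  | cons a q ih =>
    rcases List.mem_cons.mp hp with rfl | hp
    · simp only [pvNu3, if_pos hv]
      split
      · exact ⟨Nat.succ_pos _, Nat.le_refl _⟩
      · rename_i h0
        exact ⟨lt_min (Nat.succ_pos _) (Nat.pos_of_ne_zero h0), min_le_left _ _⟩
    · obtain ⟨h1, h2⟩ := ih hp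
      simp only [pvNu3]
      split
      · rw [if_neg h1.ne']
        exact ⟨lt_min (Nat.succ_pos _) h1, le_trans (min_le_right _ _) h2⟩
      · exact ⟨h1, h2⟩

theorem pvNu3_pos_elim {q : List (Int × Int × Int)} (h : 0 < pvNu3 q) :
    ∃ p ∈ q, p.1 ≤ p.2.1 ∧ (p.2.1 - p.1).toNat + 1 = pvNu3 q := by
  induction q with
  | nil => exact absurd h (lt_irrefl 0)
  | cons a q ih =>
    by_cases hv : a.1 ≤ a.2.1
    · simp only [pvNu3, if_pos hv]
      by_cases h0 : pvNu3 q = 0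
      · rw [if_pos h0]; exact ⟨a, List.mem_cons_self, hv, rfl⟩
      · rw [if_neg h0]
        rcases Nat.le_total ((a.2.1 - a.1).toNat + 1) (pvNu3 q) with hle | hle
        · rw [Nat.min_eq_left hle]; exact ⟨a, List.mem_cons_self, hv, rfl⟩
        · rw [Nat.min_eq_right hle]
          obtain ⟨p, hpq, hpv, hpe⟩ := ih (Nat.pos_of_ne_zero h0)
          exact ⟨p, List.mem_cons_of_mem _ hpq, hpv, hpe⟩
    · simp only [pvNu3, if_neg hv] at h ⊢
      obtain ⟨p, hpq, hpv, hpe⟩ := ih h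
      exact ⟨p, List.mem_cons_of_mem _ hpq, hpv, hpe⟩

theorem pvNu3_cons_invalid {a : Int × Int × Int} {q : List (Int × Int × Int)}
    (hv : ¬ a.1 ≤ a.2.1) : pvNu3 (a :: q) = pvNu3 q := by
  simp [pvNu3, hv]

theorem pv_findIdx_append_of_exists {α : Type} (pred : α → Bool) (l₁ l₂ : List α)
    (h : ∃ x ∈ l₁, pred x = true) : (l₁ ++ l₂).findIdx pred = l₁.findIdx pred := by
  induction l₁ with
  | nil => simp at h
  | cons a l ih =>
    by_cases ha : pred a
    · simp [List.findIdx_cons, ha]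
    · simp only [List.cons_append, List.findIdx_cons, ha, cond_false]
      obtain ⟨x, hx, hpx⟩ := h
      rcases List.mem_cons.mp hx with rfl | hx
      · exact absurd hpx (by simp [ha])
      · rw [ih ⟨x, hx, hpx⟩]

/-- min over the valid states (me ≤ opp) of (gap+1); 0 when none. -/
def pvNu2 : List (Int × Int) → Nat
  | [] => 0
  | p :: q =>
    if p.1 ≤ p.2 then
      (if pvNu2 q = 0 then (p.2 - p.1).toNat + 1 else min ((p.2 - p.1).toNat + 1) (pvNu2 q))
    else pvNu2 q

theorem pvNu2_le_of_mem {q : List (Int × Int)} {p : Int × Int}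
    (hp : p ∈ q) (hv : p.1 ≤ p.2) : 0 < pvNu2 q ∧ pvNu2 q ≤ (p.2 - p.1).toNat + 1 := by
  induction q with
  | nil => cases hp
  | cons a q ih =>
    rcases List.mem_cons.mp hp with rfl | hp
    · simp only [pvNu2, if_pos hv]
      split
      · exact ⟨Nat.succ_pos _, Nat.le_refl _⟩
      · rename_i h0
        exact ⟨lt_min (Nat.succ_pos _) (Nat.pos_of_ne_zero h0), min_le_left _ _⟩
    · obtain ⟨h1, h2⟩ := ih hp
      simp only [pvNu2]
      split
      · rw [if_neg h1.ne']
        exact ⟨lt_min (Nat.succ_pos _) h1, le_trans (min_le_right _ _) h2⟩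
      · exact ⟨h1, h2⟩

theorem pvNu2_pos_elim {q : List (Int × Int)} (h : 0 < pvNu2 q) :
    ∃ p ∈ q, p.1 ≤ p.2 ∧ (p.2 - p.1).toNat + 1 = pvNu2 q := by
  induction q with
  | nil => exact absurd h (lt_irrefl 0)
  | cons a q ih =>
    by_cases hv : a.1 ≤ a.2
    · simp only [pvNu2, if_pos hv]
      by_cases h0 : pvNu2 q = 0
      · rw [if_pos h0]; exact ⟨a, List.mem_cons_self, hv, rfl⟩
      · rw [if_neg h0]
        rcases Nat.le_total ((a.2 - a.1).toNat + 1) (pvNu2 q) with hle | hle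
        · rw [Nat.min_eq_left hle]; exact ⟨a, List.mem_cons_self, hv, rfl⟩
        · rw [Nat.min_eq_right hle]
          obtain ⟨p, hpq, hpv, hpe⟩ := ih (Nat.pos_of_ne_zero h0)
          exact ⟨p, List.mem_cons_of_mem _ hpq, hpv, hpe⟩
    · simp only [pvNu2, if_neg hv] at h ⊢
      obtain ⟨p, hpq, hpv, hpe⟩ := ih h
      exact ⟨p, List.mem_cons_of_mem _ hpq, hpv, hpe⟩

/-- the body of B's inner `for me, op in frontier` loop (add double child, then +1 child). -/
def pvStepB (acc : PySem.Set (Int × Int)) (p : Int × Int) : PySem.Set (Int × Int) :=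
  if p.1 < p.2 then
    PySem.Set.add (if p.1 * 2 ≤ p.2 + 3 then PySem.Set.add acc (p.1 * 2, p.2 + 3) else acc)
      (p.1 + 1, p.2)
  else acc

theorem pv_mem_foldl_stepB (F : List (Int × Int)) (acc : PySem.Set (Int × Int)) (x : Int × Int) :
    x ∈ F.foldl pvStepB acc ↔ x ∈ acc ∨ ∃ p ∈ F, p.1 < p.2 ∧
      (x = (p.1 + 1, p.2) ∨ (p.1 * 2 ≤ p.2 + 3 ∧ x = (p.1 * 2, p.2 + 3))) := by
  induction F generalizing acc with
  | nil => simp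
  | cons a F ih =>
    simp only [List.foldl_cons, ih, pvStepB]
    split
    · split
      · simp only [PySem.Set.mem_add, List.mem_cons]
        constructor
        · rintro (((h | h) | h) | ⟨p, hp, hlt, h⟩)
          · exact Or.inl h
          · exact Or.inr ⟨a, Or.inl rfl, by tauto⟩
          · exact Or.inr ⟨a, Or.inl rfl, by tauto⟩
          · exact Or.inr ⟨p, Or.inr hp, hlt, h⟩
        · rintro (h | ⟨p, rfl | hp, hlt, h⟩)
          · tauto
          · tauto
          · exact Or.inr ⟨p, hp, hlt, h⟩
      · simp only [PySem.Set.mem_add, List.mem_cons]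
        constructor
        · rintro ((h | h) | ⟨p, hp, hlt, h⟩)
          · exact Or.inl h
          · exact Or.inr ⟨a, Or.inl rfl, by tauto⟩
          · exact Or.inr ⟨p, Or.inr hp, hlt, h⟩
        · rintro (h | ⟨p, rfl | hp, hlt, h⟩)
          · tauto
          · rcases h with h | ⟨hd, h⟩
            · tauto
            · omega
          · exact Or.inr ⟨p, hp, hlt, h⟩
    · simp only [List.mem_cons]
      constructor
      · rintro (h | ⟨p, hp, hlt, h⟩)
        · exact Or.inl h
        · exact Or.inr ⟨p, Or.inr hp, hlt, h⟩
      · rintro (h | ⟨p, rfl | hp, hlt, h⟩)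
        · exact Or.inl h
        · omega
        · exact Or.inr ⟨p, hp, hlt, h⟩

theorem pv_foldl_stepB_invalid (F : List (Int × Int)) (acc : PySem.Set (Int × Int))
    (h : ∀ p ∈ F, ¬ p.1 < p.2) : F.foldl pvStepB acc = acc := by
  induction F generalizing acc with
  | nil => rfl
  | cons a F ih =>
    simp only [List.foldl_cons, pvStepB, if_neg (h a List.mem_cons_self)]
    exact ih acc fun p hp => h p (List.mem_cons_of_mem _ hp)


theorem pvDecA_lt (me opp c : Int) (rest : List (Int × Int × Int)) (hlt : me < opp) :
    Prod.Lex (fun a b => a < b) (fun a b => a < b)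
      (pvNu3 ((rest ++ if me * 2 ≤ opp + 3 then [(me * 2, opp + 3, c + 1)] else []) ++
          if me + 1 ≤ opp then [(me + 1, opp, c + 1)] else []),
        pvIdx3 ((rest ++ if me * 2 ≤ opp + 3 then [(me * 2, opp + 3, c + 1)] else []) ++
          if me + 1 ≤ opp then [(me + 1, opp, c + 1)] else []))
      (pvNu3 ((me, opp, c) :: rest), pvIdx3 ((me, opp, c) :: rest)) := by
  set q' := (rest ++ if me * 2 ≤ opp + 3 then [(me * 2, opp + 3, c + 1)] else []) ++
      if me + 1 ≤ opp then [(me + 1, opp, c + 1)] else [] with hq'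
  have hIle : me + 1 ≤ opp := hlt
  have hImem : (me + 1, opp, c + 1) ∈ q' := by
    rw [hq', if_pos hIle]
    exact List.mem_append_right _ List.mem_cons_self
  have h1 : 0 < pvNu3 q' ∧ pvNu3 q' ≤ (opp - (me + 1)).toNat + 1 :=
    pvNu3_le_of_mem hImem (show ((me + 1, opp, c + 1) : Int × Int × Int).1 ≤ (me + 1, opp, c + 1).2.1 from hIle)
  have hq : pvNu3 ((me, opp, c) :: rest) =
      if pvNu3 rest = 0 then (opp - me).toNat + 1 else min ((opp - me).toNat + 1) (pvNu3 rest) := by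
    simp only [pvNu3, if_pos (le_of_lt hlt)]
  rcases Nat.lt_or_ge (pvNu3 q') (pvNu3 ((me, opp, c) :: rest)) with hcase | hge
  · exact Prod.Lex.left _ _ hcase
  · have htn : (opp - (me + 1)).toNat + 1 = (opp - me).toNat := by
      rw [show opp - (me + 1) = opp - me - 1 from sub_add_eq_sub_sub opp me 1, Int.pred_toNat]
      exact Nat.succ_pred_eq_of_pos (Int.pos_iff_toNat_pos.mp (Int.sub_pos.mpr hlt))
    have hle_g : pvNu3 ((me, opp, c) :: rest) ≤ (opp - me).toNat := by
      rw [← htn]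
      exact Nat.lt_succ_iff.mp (Nat.lt_succ_of_le (le_trans hge h1.2))
    have hr0 : pvNu3 rest ≠ 0 := by
      intro h
      rw [hq, if_pos h] at hle_g
      exact Nat.not_succ_le_self _ hle_g
    have hqr : pvNu3 ((me, opp, c) :: rest) = pvNu3 rest := by
      rcases Nat.le_total ((opp - me).toNat + 1) (pvNu3 rest) with h | h
      · exfalso
        rw [hq, if_neg hr0, Nat.min_eq_left h] at hle_g
        exact Nat.not_succ_le_self _ hle_g
      · rw [hq, if_neg hr0, Nat.min_eq_right h]
    obtain ⟨p, hpr, hpv, hpe⟩ := pvNu3_pos_elim (q := rest) (Nat.pos_of_ne_zero hr0)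
    have hpq' : p ∈ q' := by
      rw [hq']
      exact List.mem_append_left _ (List.mem_append_left _ hpr)
    have h2 : 0 < pvNu3 q' ∧ pvNu3 q' ≤ (p.2.1 - p.1).toNat + 1 := pvNu3_le_of_mem hpq' hpv
    have hveq : pvNu3 q' = pvNu3 ((me, opp, c) :: rest) := by
      refine le_antisymm ?_ hge
      rw [hqr, ← hpe]
      exact h2.2
    have hidx : pvIdx3 q' < pvIdx3 ((me, opp, c) :: rest) := by
      unfold pvIdx3
      rw [hveq]
      have hpp : (decide (p.1 ≤ p.2.1) && ((p.2.1 - p.1).toNat + 1 == pvNu3 ((me, opp, c) :: rest))) = true := by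
        rw [decide_eq_true hpv, Bool.true_and, beq_iff_eq, hqr]
        exact hpe
      have hhead : (decide ((me, opp, c).1 ≤ (me, opp, c).2.1) &&
          (((me, opp, c).2.1 - (me, opp, c).1).toNat + 1 == pvNu3 ((me, opp, c) :: rest))) = false := by
        have hne : (((me, opp, c) : Int × Int × Int).2.1 - (me, opp, c).1).toNat + 1 ≠
            pvNu3 ((me, opp, c) :: rest) := by
          intro h
          have h' : (opp - me).toNat + 1 = pvNu3 ((me, opp, c) :: rest) := h
          have hc : (opp - me).toNat + 1 ≤ (opp - me).toNat := by rw [h']; exact hle_g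
          exact Nat.not_succ_le_self _ hc
        rw [beq_eq_false_iff_ne.mpr hne, Bool.and_false]
      rw [List.findIdx_cons, hhead]
      rw [hq', pv_findIdx_append_of_exists _ _ _ ⟨p, List.mem_append_left _ hpr, hpp⟩]
      rw [pv_findIdx_append_of_exists _ _ _ ⟨p, hpr, hpp⟩]
      exact Nat.lt_succ_self _
    rw [hveq]
    exact Prod.Lex.right _ hidx

theorem pvDecA_gt (me opp c : Int) (rest : List (Int × Int × Int))
    (hne : ¬ me = opp) (hnlt : ¬ me < opp) :
    Prod.Lex (fun a b => a < b) (fun a b => a < b)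
      (pvNu3 rest, pvIdx3 rest)
      (pvNu3 ((me, opp, c) :: rest), pvIdx3 ((me, opp, c) :: rest)) := by
  have hv : ¬ (((me, opp, c) : Int × Int × Int).1 ≤ (me, opp, c).2.1) := fun h =>
    hne (le_antisymm h (le_of_not_gt hnlt))
  have hnu := pvNu3_cons_invalid (q := rest) hv
  have hidx : pvIdx3 rest < pvIdx3 ((me, opp, c) :: rest) := by
    unfold pvIdx3
    rw [hnu]
    have hhead : (decide ((me, opp, c).1 ≤ (me, opp, c).2.1) &&
        (((me, opp, c).2.1 - (me, opp, c).1).toNat + 1 == pvNu3 rest)) = false := by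
      rw [decide_eq_false hv, Bool.false_and]
    rw [List.findIdx_cons, hhead]
    exact Nat.lt_succ_self _
  rw [hnu]
  exact Prod.Lex.right _ hidx

theorem pvDecB (F : PySem.Set (Int × Int)) (hne : ¬ F.isEmpty = true)
    (hany : ¬ (F.any fun p => p.1 == p.2) = true) :
    Prod.Lex (fun a b => a < b) (fun a b => a < b)
      (pvNu2 (F.foldl pvStepB PySem.Set.empty), (F.foldl pvStepB PySem.Set.empty).length)
      (pvNu2 F, F.length) := by
  by_cases h0 : pvNu2 F = 0
  · have hinv : ∀ p ∈ F, ¬ p.1 < p.2 := fun p hp hlt =>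
      (pvNu2_le_of_mem hp (le_of_lt hlt)).1.ne' h0
    have hnil : F.foldl pvStepB PySem.Set.empty = PySem.Set.empty :=
      pv_foldl_stepB_invalid F _ hinv
    rw [hnil]
    have h2 : pvNu2 (PySem.Set.empty : PySem.Set (Int × Int)) = 0 := rfl
    rw [h2, ← h0]
    refine Prod.Lex.right _ ?_
    have hFne : F ≠ [] := fun h => hne (by rw [h]; rfl)
    exact List.length_pos_of_ne_nil hFne
  · obtain ⟨p, hp, hv, he⟩ := pvNu2_pos_elim (Nat.pos_of_ne_zero h0)
    have hne' : p.1 ≠ p.2 := fun h =>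
      hany (List.any_eq_true.mpr ⟨p, hp, by rw [h]; exact beq_self_eq_true _⟩)
    have hlt : p.1 < p.2 := lt_of_le_of_ne hv hne'
    have hmem : (p.1 + 1, p.2) ∈ F.foldl pvStepB PySem.Set.empty :=
      (pv_mem_foldl_stepB F PySem.Set.empty _).mpr (Or.inr ⟨p, hp, hlt, Or.inl rfl⟩)
    have hb : 0 < pvNu2 (F.foldl pvStepB PySem.Set.empty) ∧
        pvNu2 (F.foldl pvStepB PySem.Set.empty) ≤ (p.2 - (p.1 + 1)).toNat + 1 :=
      pvNu2_le_of_mem hmem (show ((p.1 + 1, p.2) : Int × Int).1 ≤ (p.1 + 1, p.2).2 from hlt)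
    refine Prod.Lex.left _ _ ?_
    have htn : (p.2 - (p.1 + 1)).toNat + 1 = (p.2 - p.1).toNat := by
      rw [show p.2 - (p.1 + 1) = p.2 - p.1 - 1 from sub_add_eq_sub_sub p.2 p.1 1, Int.pred_toNat]
      exact Nat.succ_pred_eq_of_pos (Int.pos_iff_toNat_pos.mp (Int.sub_pos.mpr hlt))
    have hb2 : pvNu2 (F.foldl pvStepB PySem.Set.empty) ≤ (p.2 - p.1).toNat := by
      rw [← htn]; exact hb.2
    rw [← he]
    exact Nat.lt_succ_of_le hb2

-- ===== PORT A =====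
-- A: FIFO-queue BFS; each queue entry carries its own move count; no visited set.
def pvLoopA : List (Int × Int × Int) → Option Int
  | [] => none
  | (me, opp, c) :: rest =>
    if me = opp then some c
    else if me < opp then
      pvLoopA (rest ++ (if me * 2 ≤ opp + 3 then [(me * 2, opp + 3, c + 1)] else [])
                    ++ (if me + 1 ≤ opp then [(me + 1, opp, c + 1)] else []))
    else pvLoopA rest
termination_by q => (pvNu3 q, pvIdx3 q)
decreasing_by
  · rename_i hne hlt
    exact pvDecA_lt me opp c rest hlt
  · rename_i hne hlt
    exact pvDecA_gt me opp c rest hne hlt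

def bfs (s : Int) (t : Int) (cnt : Int) : Option Int :=
  pvLoopA [(s, t, cnt)]

-- ===== PORT B =====
-- B: level-synchronous BFS over deduplicated frontier sets, one level counter.
/-- `nxt`: the next frontier set, built by B's inner loop. -/
def pvNext (F : PySem.Set (Int × Int)) : PySem.Set (Int × Int) :=
  F.foldl pvStepB PySem.Set.empty

def pvLoopB (F : PySem.Set (Int × Int)) (c : Int) : Option Int :=
  if F.isEmpty then none
  else if F.any (fun p => p.1 == p.2) then some c
  else pvLoopB (pvNext F) (c + 1)
termination_by (pvNu2 F, F.length)
decreasing_by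
  rename_i hne hany
  exact pvDecB F hne hany

def bfs_alt (s : Int) (t : Int) (cnt : Int) : Option Int :=
  pvLoopB (PySem.Set.ofList [(s, t)]) cnt

-- ===== PRECONDITION & SPEC =====
def Spec_bfs (s : Int) (t : Int) (cnt : Int) (out : Option Int) : Prop := out = bfs_alt s t cnt
instance (s : Int) (t : Int) (cnt : Int) (out : Option Int) : Decidable (Spec_bfs s t cnt out) := by unfold Spec_bfs; infer_instance

-- ===== CLAIM (what is proved, stated in full; the proofs are below) =====
def Claim_equal_bfs : Prop := ∀ (s : Int) (t : Int) (cnt : Int), Dom_bfs s t cnt → Spec_bfs s t cnt (bfs s t cnt)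

-- ===== LEMMAS AND PROOFS =====

theorem pvLoopA_nil : pvLoopA [] = none := by rw [pvLoopA]

theorem pvLoopA_cons (me opp c : Int) (rest : List (Int × Int × Int)) :
    pvLoopA ((me, opp, c) :: rest) =
      if me = opp then some c
      else if me < opp then
        pvLoopA (rest ++ (if me * 2 ≤ opp + 3 then [(me * 2, opp + 3, c + 1)] else [])
                      ++ (if me + 1 ≤ opp then [(me + 1, opp, c + 1)] else []))
      else pvLoopA rest := by
  rw [pvLoopA]

theorem pvLoopB_eq (F : PySem.Set (Int × Int)) (c : Int) :
    pvLoopB F c =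
      if F.isEmpty then none
      else if F.any (fun p => p.1 == p.2) then some c
      else pvLoopB (pvNext F) (c + 1) := by
  rw [pvLoopB]

/-- the children of one state, in A's production order. -/
def pvExpand (p : Int × Int) : List (Int × Int) :=
  if p.1 < p.2 then
    (if p.1 * 2 ≤ p.2 + 3 then [(p.1 * 2, p.2 + 3)] else []) ++
    (if p.1 + 1 ≤ p.2 then [(p.1 + 1, p.2)] else [])
  else []

def pvMapc (c : Int) (F : List (Int × Int)) : List (Int × Int × Int) :=
  F.map (fun p => (p.1, p.2, c))

/-- Level identity for A's FIFO loop: a queue holding level `c` states `F` followed by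
    level `c+1` states `G` either finds an equal pair in `F` (returning `c`) or reduces
    to the pure level-`c+1` queue `G ++ children of F`. -/
theorem pvLoopA_level (F G : List (Int × Int)) (c : Int) :
    pvLoopA (pvMapc c F ++ pvMapc (c + 1) G) =
      if F.any (fun p => p.1 == p.2) then some c
      else pvLoopA (pvMapc (c + 1) (G ++ F.flatMap pvExpand)) := by
  induction F generalizing G with
  | nil => simp [pvMapc]
  | cons p F ih =>
    have hcons : pvMapc c (p :: F) ++ pvMapc (c + 1) G =
        (p.1, p.2, c) :: (pvMapc c F ++ pvMapc (c + 1) G) := by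
      simp [pvMapc]
    rw [hcons, pvLoopA_cons]
    by_cases heq : p.1 = p.2
    · simp [heq]
    · rw [if_neg heq]
      have hany : (p :: F).any (fun p => p.1 == p.2) = F.any (fun p => p.1 == p.2) := by
        simp [List.any_cons, heq]
      by_cases hlt : p.1 < p.2
      · rw [if_pos hlt]
        have harr : (pvMapc c F ++ pvMapc (c + 1) G)
              ++ (if p.1 * 2 ≤ p.2 + 3 then [(p.1 * 2, p.2 + 3, c + 1)] else [])
              ++ (if p.1 + 1 ≤ p.2 then [(p.1 + 1, p.2, c + 1)] else []) =
            pvMapc c F ++ pvMapc (c + 1) (G ++ pvExpand p) := by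
          simp only [pvMapc, pvExpand, if_pos hlt, List.map_append, List.append_assoc]
          congr 2
          split <;> split <;> simp
        rw [harr, ih (G ++ pvExpand p)]
        rw [hany]
        congr 1
        simp [List.flatMap_cons, List.append_assoc]
      · rw [if_neg hlt, ih G, hany]
        have : pvExpand p = [] := by simp [pvExpand, hlt]
        simp [List.flatMap_cons, this]

theorem pv_main_aux : ∀ (n : Nat) (F S : List (Int × Int)) (c : Int),
    pvNu2 F < n → (∀ x, x ∈ F ↔ x ∈ S) → pvLoopA (pvMapc c F) = pvLoopB S c := by
  intro n
  induction n with
  | zero => intro F S c h; omega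
  | succ n ih =>
    intro F S c hn hmem
    rw [pvLoopB_eq]
    by_cases hS : S.isEmpty
    · have hSnil : S = [] := List.isEmpty_iff.mp hS
      have hFnil : F = [] := by
        apply List.eq_nil_iff_forall_not_mem.mpr
        intro x hx
        exact absurd ((hmem x).mp hx) (by simp [hSnil])
      rw [if_pos hS, hFnil]
      exact pvLoopA_nil
    · rw [if_neg hS]
      have hanyEq : F.any (fun p => p.1 == p.2) = S.any (fun p => p.1 == p.2) := by
        cases hFS : S.any (fun p => p.1 == p.2) with
        | false =>
          rw [List.any_eq_false] at hFS ⊢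
          intro p hp
          exact hFS p ((hmem p).mp hp)
        | true =>
          rw [List.any_eq_true] at hFS ⊢
          obtain ⟨p, hp, hpe⟩ := hFS
          exact ⟨p, (hmem p).mpr hp, hpe⟩
      have hL := pvLoopA_level F [] c
      rw [show pvMapc (c + 1) ([] : List (Int × Int)) = [] from rfl, List.append_nil,
        List.nil_append] at hL
      by_cases hA : F.any (fun p => p.1 == p.2)
      · rw [hL, if_pos hA, if_pos (hanyEq ▸ hA)]
      · rw [hL, if_neg hA, if_neg (hanyEq ▸ hA)]
        have hmem' : ∀ x, x ∈ F.flatMap pvExpand ↔ x ∈ pvNext S := by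
          intro x
          rw [List.mem_flatMap, pvNext, pv_mem_foldl_stepB]
          have hexp : ∀ p : Int × Int, x ∈ pvExpand p ↔
              p.1 < p.2 ∧ (x = (p.1 + 1, p.2) ∨ (p.1 * 2 ≤ p.2 + 3 ∧ x = (p.1 * 2, p.2 + 3))) := by
            intro p
            by_cases hlt : p.1 < p.2
            · have h1 : p.1 + 1 ≤ p.2 := hlt
              simp only [pvExpand, if_pos hlt, if_pos h1, List.mem_append]
              by_cases hd : p.1 * 2 ≤ p.2 + 3 <;> (simp [hd, hlt]; try tauto)
            · simp [pvExpand, hlt]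
          constructor
          · rintro ⟨p, hp, hx⟩
            exact Or.inr ⟨p, (hmem p).mp hp, (hexp p).mp hx⟩
          · rintro (h | ⟨p, hp, hlt, hx⟩)
            · exact absurd h (by simp [PySem.Set.empty])
            · exact ⟨p, (hmem p).mpr hp, (hexp p).mpr ⟨hlt, hx⟩⟩
        by_cases h0 : pvNu2 F = 0
        · have hinv : ∀ p ∈ F, ¬ p.1 ≤ p.2 := by
            intro p hp hv
            have := pvNu2_le_of_mem hp hv
            omega
          have hFnil : F.flatMap pvExpand = [] := by
            apply List.flatMap_eq_nil_iff.mpr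
            intro p hp
            have hnlt : ¬ p.1 < p.2 := fun h => hinv p hp (le_of_lt h)
            simp [pvExpand, hnlt]
          have hSnil : pvNext S = [] := by
            apply pv_foldl_stepB_invalid
            intro p hp hlt
            exact hinv p ((hmem p).mpr hp) (le_of_lt hlt)
          rw [hFnil, show pvMapc (c + 1) ([] : List (Int × Int)) = [] from rfl, pvLoopA_nil,
            hSnil, pvLoopB_eq]
          rfl
        · apply ih _ _ (c + 1) _ hmem'
          obtain ⟨p, hp, hv, he⟩ := pvNu2_pos_elim (Nat.pos_of_ne_zero h0)
          have hpe : p.1 ≠ p.2 := by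
            intro h
            exact hA (List.any_eq_true.mpr ⟨p, hp, by simp [h]⟩)
          have hlt : p.1 < p.2 := lt_of_le_of_ne hv hpe
          have hinc : (p.1 + 1, p.2) ∈ F.flatMap pvExpand := by
            rw [List.mem_flatMap]
            refine ⟨p, hp, ?_⟩
            have h1 : p.1 + 1 ≤ p.2 := hlt
            simp [pvExpand, hlt, h1]
          have hb : 0 < pvNu2 (F.flatMap pvExpand) ∧
              pvNu2 (F.flatMap pvExpand) ≤ (p.2 - (p.1 + 1)).toNat + 1 :=
            pvNu2_le_of_mem hinc (by simp only []; omega)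
          omega

theorem bfs_main : ∀ (s t cnt : Int), bfs s t cnt = bfs_alt s t cnt := by
  intro s t cnt
  have hmem : ∀ x, x ∈ ([(s, t)] : List (Int × Int)) ↔ x ∈ PySem.Set.ofList [(s, t)] := by
    intro x
    rw [PySem.Set.mem_ofList]
  exact pv_main_aux (pvNu2 [(s, t)] + 1) [(s, t)] (PySem.Set.ofList [(s, t)]) cnt
    (Nat.lt_succ_self _) hmem

-- ===== VERDICT (by name: the statement is the Claim_ definition above) =====
theorem bfs_spec : Claim_equal_bfs := by
  intro s t cnt _
  unfold Spec_bfs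
  exact bfs_main s t cnt
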